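-- pv_equiv track=rewrite | github.com/UOR-Foundation/atlas-embeddings | multiplicity_core/phase0_index.py | list_admissible_projectors
-- ===== SOURCE A (Python) =====
-- from typing import Tuple, Callable, Optional
--
-- INDEX_SIZE = 12288
--
-- def prime_factors(n: int) -> dict[int, int]:
--     """
--     Compute prime factorization of n.
--
--     Args:
--         n: Positive integer
--
--     Returns:
--         Dictionary mapping prime → exponent
--     """
--     if n <= 1:
--         return {}
--
--     factors = {}
--     d = 2
--     while d * d <= n:
--         while n % d == 0:
--             factors[d] = factors.get(d, 0) + 1
--             n //= d
--         d += 1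
--     if n > 1:
--         factors[n] = factors.get(n, 0) + 1
--
--     return factors
--
-- def list_admissible_projectors(n: int = INDEX_SIZE, max_prime: int = 100) -> list[Tuple[int, int]]:
--     """
--     List all admissible (p, r) pairs for the given index size.
--
--     Args:
--         n: Index size (default: INDEX_SIZE = 12,288)
--         max_prime: Maximum prime to consider
--
--     Returns:
--         List of (p, r) pairs where p^r | n
--     """
--     factors = prime_factors(n)
--     admissible = []
--
--     for p, max_r in factors.items():
--         if p <= max_prime:
--             for r in range(1, max_r + 1):
--                 admissible.append((p, r))
--
--     return sorted(admissible)
-- ===== SOURCE B (Python) =====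
-- def list_admissible_projectors(n: int = 12288, max_prime: int = 100):
--     """Single fused trial-division pass: factor and emit (p, r) pairs in one
--     ascending scan, already sorted -- no factor dict, no final sort."""
--     out = []
--     m = n
--     if m <= 1:
--         return out
--     d = 2
--     while d <= max_prime and d * d <= m:
--         r = 0
--         while m % d == 0:
--             m //= d
--             r += 1
--             out.append((d, r))
--         d += 1
--     if 1 < m <= max_prime:
--         out.append((m, 1))
--     return out
-- ===== Notes on version B (the rewrite author's own statement) =====
-- stated objective: simpler
-- what changed: Replaces factor-dict construction plus filter/expand plus final sort with a single fused trial-division scan bounded by max_prime that emits (p,r) pairs directly in already-sorted order.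
import Mathlib
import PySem

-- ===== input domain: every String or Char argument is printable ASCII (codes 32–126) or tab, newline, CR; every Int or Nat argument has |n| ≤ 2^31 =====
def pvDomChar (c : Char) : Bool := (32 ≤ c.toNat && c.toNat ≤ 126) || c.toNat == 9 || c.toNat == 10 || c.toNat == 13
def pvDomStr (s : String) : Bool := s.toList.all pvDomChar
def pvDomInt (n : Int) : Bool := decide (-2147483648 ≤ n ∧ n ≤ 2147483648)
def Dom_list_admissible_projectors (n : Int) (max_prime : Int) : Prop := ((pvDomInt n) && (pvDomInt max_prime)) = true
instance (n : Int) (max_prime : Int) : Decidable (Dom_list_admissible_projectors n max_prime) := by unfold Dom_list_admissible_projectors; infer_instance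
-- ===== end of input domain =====

-- B fuses A's factor-dict construction, filter/expand and final sort into one ascending
-- trial-division scan bounded by max_prime that emits the (p, r) pairs already in order (objective: simpler).

-- ===== PORT A =====
-- inner 'while n % d == 0' loop of prime_factors. The Nat fuel only makes the
-- recursion structural; the lemmas below prove the fuel passed at each call site suffices.
def pfInner (fuel : Nat) (m d : Int) (acc : PySem.Dict Int Int) : Int × PySem.Dict Int Int :=
  match fuel with
  | 0 => (m, acc)
  | fuel + 1 =>
    if PySem.Int.mod m d = 0 then
      pfInner fuel (PySem.Int.floordiv m d) d (acc.insert d (acc.getD d 0 + 1))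
    else (m, acc)

-- outer 'while d * d <= n' loop of prime_factors
def pfOuter (fuel : Nat) (m d : Int) (acc : PySem.Dict Int Int) : Int × PySem.Dict Int Int :=
  match fuel with
  | 0 => (m, acc)
  | fuel + 1 =>
    if d * d ≤ m then
      let r := pfInner m.toNat m d acc
      pfOuter fuel r.1 (d + 1) r.2
    else (m, acc)

def prime_factors (n : Int) : PySem.Dict Int Int :=
  if n ≤ 1 then PySem.Dict.empty
  else
    let r := pfOuter (n.toNat + 1) n 2 PySem.Dict.empty
    if 1 < r.1 then r.2.insert r.1 (r.2.getD r.1 0 + 1) else r.2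

def list_admissible_projectors (n : Int) (max_prime : Int) : List (Int × Int) :=
  let factors := prime_factors n
  let admissible := factors.items.foldl
    (fun acc pe =>
      if pe.1 ≤ max_prime then
        (PySem.List.pyRange 1 (pe.2 + 1) 1).foldl (fun a r => a ++ [(pe.1, r)]) acc
      else acc) []
  PySem.List.sorted2 admissible (fun x => x.1) (fun x => x.2)

-- ===== PORT B =====
-- inner 'while m % d == 0' loop of B (fuel as in pfInner)
def altInner (fuel : Nat) (m d r : Int) (out : List (Int × Int)) : Int × Int × List (Int × Int) :=
  match fuel with
  | 0 => (m, r, out)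
  | fuel + 1 =>
    if PySem.Int.mod m d = 0 then
      altInner fuel (PySem.Int.floordiv m d) d (r + 1) (out ++ [(d, r + 1)])
    else (m, r, out)

-- outer 'while d <= max_prime and d * d <= m' loop of B
def altOuter (fuel : Nat) (m d max_prime : Int) (out : List (Int × Int)) : Int × List (Int × Int) :=
  match fuel with
  | 0 => (m, out)
  | fuel + 1 =>
    if d ≤ max_prime ∧ d * d ≤ m then
      let t := altInner m.toNat m d 0 out
      altOuter fuel t.1 (d + 1) max_prime t.2.2
    else (m, out)

def list_admissible_projectors_alt (n : Int) (max_prime : Int) : List (Int × Int) :=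
  if n ≤ 1 then []
  else
    let t := altOuter (n.toNat + 1) n 2 max_prime []
    if 1 < t.1 ∧ t.1 ≤ max_prime then t.2 ++ [(t.1, 1)] else t.2

-- ===== PRECONDITION & SPEC =====
def Spec_list_admissible_projectors (n : Int) (max_prime : Int) (out : List (Int × Int)) : Prop := out = list_admissible_projectors_alt n max_prime
instance (n : Int) (max_prime : Int) (out : List (Int × Int)) : Decidable (Spec_list_admissible_projectors n max_prime out) := by unfold Spec_list_admissible_projectors; infer_instance

-- ===== CLAIM (what is proved, stated in full; the proofs are below) =====
def Claim_equal_list_admissible_projectors : Prop := ∀ (n : Int) (max_prime : Int), Dom_list_admissible_projectors n max_prime → Spec_list_admissible_projectors n max_prime (list_admissible_projectors n max_prime)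

-- ===== LEMMAS AND PROOFS =====

lemma pv_dec_div (m d : Int) (h2 : 2 ≤ d) (hm : 0 < m) :
    (PySem.Int.floordiv m d).toNat < m.toNat := by
  have hd : (0:Int) < d := by omega
  have : PySem.Int.floordiv m d < m := by
    rw [PySem.Int.floordiv_eq_ediv_of_pos hd]
    exact Int.ediv_lt_of_lt_mul hd (by nlinarith)
  omega

-- pure multiplicity extractor: (m with all factors d divided out, how many were divided)
def dcount (m d : Int) : Int × Nat :=
  if h : 2 ≤ d ∧ 0 < m ∧ PySem.Int.mod m d = 0 then
    let t := dcount (PySem.Int.floordiv m d) d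
    (t.1, t.2 + 1)
  else (m, 0)
termination_by m.toNat
decreasing_by
  exact pv_dec_div m d h.1 h.2.1

lemma fdiv_pos_lt (m d : Int) (hd : 2 ≤ d) (hm : 0 < m) (hdvd : d ∣ m) :
    0 < PySem.Int.floordiv m d ∧ PySem.Int.floordiv m d < m := by
  have hd0 : (0:Int) < d := by omega
  rw [PySem.Int.floordiv_eq_ediv_of_pos hd0]
  constructor
  · rcases hdvd with ⟨k, hk⟩
    have hk1 : 1 ≤ k := by nlinarith
    have : m / d = k := by rw [hk]; exact Int.mul_ediv_cancel_left _ (by omega)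
    omega
  · exact Int.ediv_lt_of_lt_mul hd0 (by nlinarith)

lemma dcount_bounds (m d : Int) (hm : 0 < m) :
    0 < (dcount m d).1 ∧ (dcount m d).1 ≤ m := by
  revert hm
  induction m using dcount.induct (d := d) with
  | case1 m h ih =>
    intro hm
    rw [dcount, dif_pos h]
    dsimp only
    have hf := fdiv_pos_lt m d h.1 hm ((PySem.Int.mod_eq_zero_iff_dvd m d).1 h.2.2)
    have := ih hf.1
    exact ⟨this.1, by omega⟩
  | case2 m h =>
    intro hm
    rw [dcount, dif_neg h]
    exact ⟨hm, le_refl m⟩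

lemma dcount_dvd (m d : Int) : (dcount m d).1 ∣ m := by
  induction m using dcount.induct (d := d) with
  | case1 m h ih =>
    rw [dcount, dif_pos h]
    dsimp only
    have hdvd : d ∣ m := (PySem.Int.mod_eq_zero_iff_dvd m d).1 h.2.2
    have hd0 : (0:Int) < d := by omega
    have hmd : PySem.Int.floordiv m d ∣ m := by
      rw [PySem.Int.floordiv_eq_ediv_of_pos hd0]
      exact ⟨d, (Int.ediv_mul_cancel hdvd).symm⟩
    exact dvd_trans ih hmd
  | case2 m h =>
    rw [dcount, dif_neg h]

lemma dcount_not_dvd (m d : Int) (hd : 2 ≤ d) (hm : 0 < m) : ¬ d ∣ (dcount m d).1 := by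
  revert hm
  induction m using dcount.induct (d := d) with
  | case1 m h ih =>
    intro hm
    rw [dcount, dif_pos h]
    dsimp only
    exact ih (fdiv_pos_lt m d h.1 hm ((PySem.Int.mod_eq_zero_iff_dvd m d).1 h.2.2)).1
  | case2 m h =>
    intro hm
    rw [dcount, dif_neg h]
    intro hdvd
    exact h ⟨hd, hm, (PySem.Int.mod_eq_zero_iff_dvd m d).2 hdvd⟩

lemma pfInner_eq : ∀ (fuel : Nat) (m d : Int) (acc : PySem.Dict Int Int),
    0 < m → 2 ≤ d → m.toNat ≤ fuel →
    pfInner fuel m d acc = ((dcount m d).1,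
      if (dcount m d).2 = 0 then acc
      else acc.insert d (acc.getD d 0 + ((dcount m d).2 : Int))) := by
  intro fuel
  induction fuel with
  | zero => intro m d acc hm hd hf; exact absurd hf (by omega)
  | succ fuel ih =>
    intro m d acc hm hd hf
    by_cases hdvd : PySem.Int.mod m d = 0
    · rw [pfInner, if_pos hdvd, dcount, dif_pos ⟨hd, hm, hdvd⟩]
      dsimp only
      have hfd := fdiv_pos_lt m d hd hm ((PySem.Int.mod_eq_zero_iff_dvd m d).1 hdvd)
      rw [ih _ _ _ hfd.1 hd (by omega)]
      rcases Nat.eq_zero_or_pos (dcount (PySem.Int.floordiv m d) d).2 with hc | hc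
      · simp [hc]
      · rw [if_neg (by omega), if_neg (by omega)]
        rw [PySem.Dict.getD_insert_self, PySem.Dict.insert_insert_self]
        congr 2
        push_cast
        ring
    · rw [pfInner, if_neg hdvd, dcount, dif_neg (fun hc => hdvd hc.2.2)]
      simp

lemma altInner_eq : ∀ (fuel : Nat) (m d r : Int) (out : List (Int × Int)),
    0 < m → 2 ≤ d → m.toNat ≤ fuel →
    altInner fuel m d r out = ((dcount m d).1, r + ((dcount m d).2 : Int),
      out ++ (List.range (dcount m d).2).map (fun i : Nat => (d, r + (i : Int) + 1))) := by
  intro fuel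
  induction fuel with
  | zero => intro m d r out hm hd hf; exact absurd hf (by omega)
  | succ fuel ih =>
    intro m d r out hm hd hf
    by_cases hdvd : PySem.Int.mod m d = 0
    · rw [altInner, if_pos hdvd, dcount, dif_pos ⟨hd, hm, hdvd⟩]
      dsimp only
      have hfd := fdiv_pos_lt m d hd hm ((PySem.Int.mod_eq_zero_iff_dvd m d).1 hdvd)
      rw [ih _ _ _ _ hfd.1 hd (by omega)]
      refine Prod.ext rfl (Prod.ext (by dsimp only; push_cast; ring) ?_)
      dsimp only
      rw [List.range_succ_eq_map, List.map_cons, List.map_map, List.append_assoc,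
        List.singleton_append]
      refine congrArg (fun t => out ++ t) ?_
      refine List.cons_eq_cons.mpr ⟨?_, ?_⟩
      · norm_num
      apply List.map_congr_left
      intro a _
      simp only [Function.comp_apply]
      push_cast
      ring_nf
    · rw [altInner, if_neg hdvd, dcount, dif_neg (fun hc => hdvd hc.2.2)]
      simp

def pairsOf (d : Int) (c : Nat) : List (Int × Int) :=
  (List.range c).map (fun i : Nat => (d, (i : Int) + 1))

lemma pv_dec_step (m m' d : Int) (hm' : m' ≤ m) (h2 : 2 ≤ d) (hdd : d * d ≤ m) :
    m'.toNat + 1 - (d + 1).toNat < m.toNat + 1 - d.toNat := by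
  have hdm : d ≤ m := by nlinarith
  omega

-- pure factorization from trial divisor d upward (A's loop, no dict)
def pfPure (m d : Int) : Int × List (Int × Nat) :=
  if h : 2 ≤ d ∧ 0 < m ∧ d * d ≤ m then
    let t := dcount m d
    let s := pfPure t.1 (d + 1)
    (s.1, (if t.2 = 0 then [] else [(d, t.2)]) ++ s.2)
  else (m, [])
termination_by (m.toNat + 1) - d.toNat
decreasing_by
  exact pv_dec_step m (dcount m d).1 d (dcount_bounds m d h.2.1).2 h.1 h.2.2

-- pure form of B's fused loop
def bPure (m d mp : Int) : Int × List (Int × Int) :=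
  if h : 2 ≤ d ∧ 0 < m ∧ d ≤ mp ∧ d * d ≤ m then
    let t := dcount m d
    let s := bPure t.1 (d + 1) mp
    (s.1, pairsOf d t.2 ++ s.2)
  else (m, [])
termination_by (m.toNat + 1) - d.toNat
decreasing_by
  exact pv_dec_step m (dcount m d).1 d (dcount_bounds m d h.2.1).2 h.1 h.2.2.2

-- 'm has no divisor in [2, d)'
def NoSmall (m d : Int) : Prop := ∀ j : Int, 2 ≤ j → j < d → ¬ j ∣ m

lemma noSmall_step (m d : Int) (hd : 2 ≤ d) (hm : 0 < m) (hns : NoSmall m d) :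
    NoSmall (dcount m d).1 (d + 1) := by
  intro j h2 hjd hdvd
  rcases (by omega : j < d ∨ j = d) with hj | hj
  · exact hns j h2 hj (dvd_trans hdvd (dcount_dvd m d))
  · subst hj
    exact dcount_not_dvd m j hd hm hdvd

lemma pfOuter_eq : ∀ (fuel : Nat) (m d : Int) (acc : PySem.Dict Int Int),
    0 < m → 2 ≤ d → m.toNat + 1 ≤ fuel + d.toNat →
    (∀ k : Int, d ≤ k → acc.contains k = false) →
    (pfOuter fuel m d acc).1 = (pfPure m d).1 ∧
    (pfOuter fuel m d acc).2.items =
      acc.items ++ (pfPure m d).2.map (fun p => (p.1, (p.2 : Int))) := by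
  intro fuel
  induction fuel with
  | zero =>
    intro m d acc hm hd hf hfresh
    have hdd : ¬ (d * d ≤ m) := by
      intro hc
      have hmd : m < d := by omega
      nlinarith
    rw [pfOuter, pfPure, dif_neg (fun hc => hdd hc.2.2)]
    simp
  | succ fuel ih =>
    intro m d acc hm hd hf hfresh
    by_cases hdd : d * d ≤ m
    · rw [pfOuter, if_pos hdd, pfPure, dif_pos ⟨hd, hm, hdd⟩]
      dsimp only
      rw [pfInner_eq m.toNat m d acc hm hd (le_refl _)]
      have hb := dcount_bounds m d hm
      have hm' : 0 < (dcount m d).1 := hb.1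
      have hdm : d ≤ m := by nlinarith
      have hf' : (dcount m d).1.toNat + 1 ≤ fuel + (d + 1).toNat := by omega
      have hdnc : acc.contains d = false := hfresh d (le_refl d)
      rcases Nat.eq_zero_or_pos (dcount m d).2 with hc | hc
      · rw [if_pos hc] at ⊢
        have := ih (dcount m d).1 (d + 1) acc hm' (by omega) hf'
          (fun k hk => hfresh k (by omega))
        simpa [hc] using this
      · rw [if_neg (by omega)] at ⊢
        have hfresh' : ∀ k : Int, d + 1 ≤ k →
            (acc.insert d (acc.getD d 0 + ((dcount m d).2 : Int))).contains k = false := by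
          intro k hk
          rw [PySem.Dict.contains_insert]
          have hne : (k == d) = false := by simp; omega
          rw [hne, hfresh k (by omega)]
          rfl
        have := ih (dcount m d).1 (d + 1) _ hm' (by omega) hf' hfresh'
        refine ⟨this.1, ?_⟩
        rw [this.2,
          PySem.Dict.items_insert_of_not_contains _ _ hdnc,
          PySem.Dict.getD_of_not_contains _ _ hdnc]
        rw [if_neg (by omega)]
        simp [List.append_assoc]
    · rw [pfOuter, if_neg hdd, pfPure, dif_neg (fun hc => hdd hc.2.2)]
      simp

lemma altOuter_eq : ∀ (fuel : Nat) (m d mp : Int) (out : List (Int × Int)),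
    0 < m → 2 ≤ d → m.toNat + 1 ≤ fuel + d.toNat →
    altOuter fuel m d mp out = ((bPure m d mp).1, out ++ (bPure m d mp).2) := by
  intro fuel
  induction fuel with
  | zero =>
    intro m d mp out hm hd hf
    have hdd : ¬ (d * d ≤ m) := by
      intro hc
      have hmd : m < d := by omega
      nlinarith
    rw [altOuter, bPure, dif_neg (fun hc => hdd hc.2.2.2)]
    simp
  | succ fuel ih =>
    intro m d mp out hm hd hf
    by_cases hcond : d ≤ mp ∧ d * d ≤ m
    · rw [altOuter, if_pos hcond, bPure, dif_pos ⟨hd, hm, hcond.1, hcond.2⟩]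
      dsimp only
      rw [altInner_eq m.toNat m d 0 out hm hd (le_refl _)]
      have hb := dcount_bounds m d hm
      have hdm : d ≤ m := by nlinarith [hcond.2]
      rw [ih (dcount m d).1 (d + 1) mp _ hb.1 (by omega) (by omega)]
      refine Prod.ext rfl ?_
      dsimp only
      rw [List.append_assoc]
      congr 2
      unfold pairsOf
      apply List.map_congr_left
      intro a _
      refine Prod.ext rfl ?_
      push_cast
      ring
    · rw [altOuter, if_neg hcond, bPure,
        dif_neg (fun hc => hcond ⟨hc.2.2.1, hc.2.2.2⟩)]
      simp

lemma pfPure_rem (m d : Int) (hm : 0 < m) (hd : 2 ≤ d) (hns : NoSmall m d) :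
    ∀ j : Int, 2 ≤ j → j ∣ (pfPure m d).1 → d ≤ j := by
  revert hm hd hns
  induction m, d using pfPure.induct with
  | case1 m d h t ih =>
    intro hm hd hns
    rw [pfPure, dif_pos h]
    dsimp only
    intro j h2 hdvd
    have := ih (dcount_bounds m d h.2.1).1 (by omega) (noSmall_step m d hd hm hns) j h2 hdvd
    omega
  | case2 m d h =>
    intro hm hd hns j h2 hdvd
    rw [pfPure, dif_neg h] at hdvd
    by_contra hlt
    exact hns j h2 (by omega) hdvd

lemma bPure_rem (m d mp : Int) (hm : 0 < m) (hd : 2 ≤ d) (hns : NoSmall m d) :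
    ∀ j : Int, 2 ≤ j → j ∣ (bPure m d mp).1 → d ≤ j := by
  revert hm hd hns
  induction m, d using bPure.induct (mp := mp) with
  | case1 m d h t ih =>
    intro hm hd hns
    rw [bPure, dif_pos h]
    dsimp only
    intro j h2 hdvd
    have := ih (dcount_bounds m d h.2.1).1 (by omega) (noSmall_step m d hd hm hns) j h2 hdvd
    omega
  | case2 m d h =>
    intro hm hd hns j h2 hdvd
    rw [bPure, dif_neg h] at hdvd
    by_contra hlt
    exact hns j h2 (by omega) hdvd

lemma pfPure_keys_ge (m d : Int) : ∀ p ∈ (pfPure m d).2, d ≤ p.1 := by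
  induction m, d using pfPure.induct with
  | case1 m d h t ih =>
    rw [pfPure, dif_pos h]
    dsimp only
    intro p hp
    rcases List.mem_append.1 hp with hp | hp
    · rcases Nat.eq_zero_or_pos (dcount m d).2 with hc | hc
      · rw [if_pos hc] at hp; simp at hp
      · rw [if_neg (by omega), List.mem_singleton] at hp
        subst hp
        exact le_refl d
    · have := ih p hp
      omega
  | case2 m d h =>
    rw [pfPure, dif_neg h]
    simp

lemma bPure_mem (m d mp : Int) : ∀ p ∈ (bPure m d mp).2, d ≤ p.1 ∧ 1 ≤ p.2 := by
  induction m, d using bPure.induct (mp := mp) with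
  | case1 m d h t ih =>
    rw [bPure, dif_pos h]
    dsimp only
    intro p hp
    rcases List.mem_append.1 hp with hp | hp
    · simp [pairsOf] at hp
      rcases hp with ⟨i, _, rfl⟩
      refine ⟨le_refl d, by omega⟩
    · have := ih p hp
      omega
  | case2 m d h =>
    rw [bPure, dif_neg h]
    simp

-- keys of the pure factorization stay below a nontrivial remainder
lemma pfPure_keys_lt_rem (m d : Int) (hm : 0 < m) (hd : 2 ≤ d) (hns : NoSmall m d)
    (hmf : 1 < (pfPure m d).1) : ∀ p ∈ (pfPure m d).2, p.1 < (pfPure m d).1 := by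
  revert hm hd hns hmf
  induction m, d using pfPure.induct with
  | case1 m d h t ih =>
    intro hm hd hns hmf
    rw [pfPure, dif_pos h] at hmf ⊢
    dsimp only at hmf ⊢
    have hm' : 0 < (dcount m d).1 := (dcount_bounds m d h.2.1).1
    have hns' := noSmall_step m d hd hm hns
    intro p hp
    rcases List.mem_append.1 hp with hp | hp
    · have hdlt : d < (pfPure (dcount m d).1 (d + 1)).1 := by
        have := pfPure_rem (dcount m d).1 (d + 1) hm' (by omega) hns'
          (pfPure (dcount m d).1 (d + 1)).1 (by omega) (dvd_refl _)
        omega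
      rcases Nat.eq_zero_or_pos (dcount m d).2 with hc | hc
      · rw [if_pos hc] at hp; simp at hp
      · rw [if_neg (by omega), List.mem_singleton] at hp
        subst hp
        exact hdlt
    · exact ih hm' (by omega) hns' hmf p hp
  | case2 m d h =>
    intro hm hd hns hmf
    rw [pfPure, dif_neg h]
    simp

-- the heart: A's filter/expand of the full factorization (plus leftover) equals B's bounded scan (plus leftover)
lemma main_eq (m d mp : Int) (hm : 0 < m) (hd : 2 ≤ d) (hns : NoSmall m d) :
    ((pfPure m d).2.flatMap (fun p => if p.1 ≤ mp then pairsOf p.1 p.2 else [])) ++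
      (if 1 < (pfPure m d).1 ∧ (pfPure m d).1 ≤ mp then [((pfPure m d).1, 1)] else []) =
    (bPure m d mp).2 ++
      (if 1 < (bPure m d mp).1 ∧ (bPure m d mp).1 ≤ mp then [((bPure m d mp).1, 1)] else []) := by
  revert hm hd hns
  induction m, d using pfPure.induct with
  | case1 m d h t ih =>
    intro hm hd hns
    have hm' : 0 < (dcount m d).1 := (dcount_bounds m d h.2.1).1
    have hns' := noSmall_step m d hd hm hns
    by_cases hdmp : d ≤ mp
    · rw [pfPure, dif_pos h, bPure, dif_pos ⟨h.1, h.2.1, hdmp, h.2.2⟩]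
      dsimp only
      rw [List.flatMap_append, List.append_assoc]
      have hhead : ((if (dcount m d).2 = 0 then ([] : List (Int × Nat)) else [(d, (dcount m d).2)]).flatMap
          (fun p => if p.1 ≤ mp then pairsOf p.1 p.2 else [])) = pairsOf d (dcount m d).2 := by
        rcases Nat.eq_zero_or_pos (dcount m d).2 with hc | hc
        · rw [if_pos hc, hc]
          simp [pairsOf]
        · rw [if_neg (by omega)]
          simp only [List.flatMap_cons, List.flatMap_nil, List.append_nil]
          rw [if_pos hdmp]
      rw [hhead, ih hm' (by omega) hns', List.append_assoc]
    · rw [pfPure, dif_pos h, bPure, dif_neg (fun hc => hdmp hc.2.2.1)]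
      dsimp only
      have hddd : d ≤ d * d := by nlinarith
      rw [if_neg (by omega : ¬ (1 < m ∧ m ≤ mp))]
      have hflat : ((if (dcount m d).2 = 0 then ([] : List (Int × Nat)) else [(d, (dcount m d).2)]) ++
            (pfPure (dcount m d).1 (d + 1)).2).flatMap
          (fun p => if p.1 ≤ mp then pairsOf p.1 p.2 else []) = [] := by
        rw [List.flatMap_eq_nil_iff]
        intro p hp
        rcases List.mem_append.1 hp with hp | hp
        · rcases Nat.eq_zero_or_pos (dcount m d).2 with hc | hc
          · rw [if_pos hc] at hp; simp at hp
          · rw [if_neg (by omega), List.mem_singleton] at hp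
            subst hp
            exact if_neg (by omega)
        · have := pfPure_keys_ge (dcount m d).1 (d + 1) p hp
          exact if_neg (by omega)
      rw [hflat]
      have hrem : ¬ (1 < (pfPure (dcount m d).1 (d + 1)).1 ∧
          (pfPure (dcount m d).1 (d + 1)).1 ≤ mp) := by
        rintro ⟨h1, h2⟩
        have := pfPure_rem (dcount m d).1 (d + 1) hm' (by omega) hns'
          (pfPure (dcount m d).1 (d + 1)).1 (by omega) (dvd_refl _)
        omega
      rw [if_neg hrem]
  | case2 m d h =>
    intro hm hd hns
    rw [pfPure, dif_neg h, bPure, dif_neg (fun hc => h ⟨hc.1, hc.2.1, hc.2.2.2⟩)]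
    simp

def LexLT (a b : Int × Int) : Prop := a.1 < b.1 ∨ (a.1 = b.1 ∧ a.2 < b.2)

lemma bPure_rem_self (m d mp : Int) (hm : 0 < m) (hd : 2 ≤ d) (hns : NoSmall m d)
    (h1 : 1 < (bPure m d mp).1) : d ≤ (bPure m d mp).1 :=
  bPure_rem m d mp hm hd hns _ (by omega) (dvd_refl _)

lemma bPure_full_pairwise (m d mp : Int) (hm : 0 < m) (hd : 2 ≤ d) (hns : NoSmall m d) :
    ((bPure m d mp).2 ++
      (if 1 < (bPure m d mp).1 ∧ (bPure m d mp).1 ≤ mp then [((bPure m d mp).1, 1)] else [])).Pairwise LexLT := by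
  revert hm hd hns
  induction m, d using bPure.induct (mp := mp) with
  | case1 m d h t ih =>
    intro hm hd hns
    have hm' : 0 < (dcount m d).1 := (dcount_bounds m d h.2.1).1
    have hns' := noSmall_step m d hd hm hns
    rw [bPure, dif_pos h]
    dsimp only
    rw [List.append_assoc, List.pairwise_append]
    refine ⟨?_, ih hm' (by omega) hns', ?_⟩
    · unfold pairsOf
      refine List.Pairwise.map _ ?_ (List.pairwise_lt_range)
      intro a b hab
      exact Or.inr ⟨rfl, by push_cast; omega⟩
    · intro a ha b hb
      have ha1 : a.1 = d := by
        simp [pairsOf] at ha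
        rcases ha with ⟨i, _, rfl⟩
        rfl
      rcases List.mem_append.1 hb with hb | hb
      · have := bPure_mem (dcount m d).1 (d + 1) mp b hb
        exact Or.inl (by omega)
      · rcases (by split at hb <;> simp_all :
            b = ((bPure (dcount m d).1 (d + 1) mp).1, (1:Int)) ∧
            1 < (bPure (dcount m d).1 (d + 1) mp).1) with ⟨rfl, hgt⟩
        have := bPure_rem_self (dcount m d).1 (d + 1) mp hm' (by omega) hns' hgt
        exact Or.inl (by dsimp only; omega)
  | case2 m d h =>
    intro hm hd hns
    rw [bPure, dif_neg h]
    split <;> simp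

lemma foldl_insertBy_of_pairwise {α : Type} (before : α → α → Bool) :
    ∀ (l acc : List α),
    l.Pairwise (fun a b => before b a = false) →
    (∀ y ∈ acc, ∀ x ∈ l, before x y = false) →
    l.foldl (fun acc x => PySem.List.insertBy before x acc) acc = acc ++ l := by
  intro l
  induction l with
  | nil => intro acc _ _; simp
  | cons x t ih =>
    intro acc h hacc
    have h1 : PySem.List.insertBy before x acc = acc ++ [x] :=
      PySem.List.insertBy_of_forall_not_before _ _ _ (fun y hy => hacc y hy x (by simp))
    have hacc' : ∀ y ∈ acc ++ [x], ∀ z ∈ t, before z y = false := by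
      intro y hy z hz
      rcases List.mem_append.1 hy with hy | hy
      · exact hacc y hy z (List.mem_cons_of_mem _ hz)
      · simp at hy; subst hy
        exact (List.pairwise_cons.1 h).1 z hz
    simp only [List.foldl_cons, h1]
    rw [ih (acc ++ [x]) (List.Pairwise.of_cons h) hacc']
    simp

lemma sorted2_eq_self (l : List (Int × Int)) (h : l.Pairwise LexLT) :
    PySem.List.sorted2 l (fun x => x.1) (fun x => x.2) = l := by
  show l.foldl (fun acc x => PySem.List.insertBy _ x acc) [] = l
  rw [foldl_insertBy_of_pairwise _ l [] ?_ (by simp)]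
  · simp
  · refine h.imp ?_
    intro a b hab
    rcases hab with hlt | ⟨heq, hlt⟩ <;> simp <;> omega

-- ===== VERDICT (by name: the statement is the Claim_ definition above) =====
lemma admissible_foldl_eq (mp : Int) (items : List (Int × Int)) :
    items.foldl
      (fun acc pe =>
        if pe.1 ≤ mp then
          (PySem.List.pyRange 1 (pe.2 + 1) 1).foldl (fun a r => a ++ [(pe.1, r)]) acc
        else acc) [] =
    items.flatMap (fun pe =>
      if pe.1 ≤ mp then (PySem.List.pyRange 1 (pe.2 + 1) 1).map (fun r => (pe.1, r)) else []) := by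
  have hbody : (fun (acc : List (Int × Int)) (pe : Int × Int) =>
      if pe.1 ≤ mp then
        (PySem.List.pyRange 1 (pe.2 + 1) 1).foldl (fun a r => a ++ [(pe.1, r)]) acc
      else acc)
      = fun acc pe => acc ++
        (if pe.1 ≤ mp then (PySem.List.pyRange 1 (pe.2 + 1) 1).map (fun r => (pe.1, r)) else []) := by
    funext acc pe
    split
    · rw [PySem.List.foldl_append_singleton_eq_map]
    · simp
  rw [hbody, PySem.List.foldl_append_eq_flatMap]
  simp

lemma fe_cast_eq (mp d : Int) (c : Nat) :
    (if d ≤ mp then (PySem.List.pyRange 1 ((c : Int) + 1) 1).map (fun r => (d, r)) else []) =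
    (if d ≤ mp then pairsOf d c else []) := by
  split
  · rw [PySem.List.pyRange_one]
    unfold pairsOf
    rw [List.map_map]
    have : ((c : Int) + 1 - 1).toNat = c := by omega
    rw [this]
    apply List.map_congr_left
    intro a _
    refine Prod.ext rfl ?_
    simp only [Function.comp_apply]
    ring
  · rfl

theorem list_admissible_projectors_spec : Claim_equal_list_admissible_projectors := by
  intro n mp _
  unfold Spec_list_admissible_projectors
  by_cases hn : n ≤ 1
  · rw [list_admissible_projectors, list_admissible_projectors_alt, prime_factors,
      if_pos hn, if_pos hn]
    rfl
  · have h0 : (0:Int) < n := by omega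
    have hns : NoSmall n 2 := fun j h2 hj _ => absurd hj (by omega)
    obtain ⟨hfst, hitems⟩ :=
      pfOuter_eq (n.toNat + 1) n 2 PySem.Dict.empty h0 (by omega) (by omega)
        (fun k _ => PySem.Dict.contains_empty k)
    have hempty : (PySem.Dict.empty : PySem.Dict Int Int).items = [] := rfl
    rw [hempty, List.nil_append] at hitems
    -- the items of A's factor dict
    have hAitems : (prime_factors n).items =
        (pfPure n 2).2.map (fun p => (p.1, (p.2 : Int))) ++
          (if 1 < (pfPure n 2).1 then [((pfPure n 2).1, 1)] else []) := by
      rw [prime_factors, if_neg hn]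
      dsimp only
      by_cases h1 : 1 < (pfOuter (n.toNat + 1) n 2 PySem.Dict.empty).1
      · rw [if_pos h1, if_pos (hfst ▸ h1)]
        have hcont : (pfOuter (n.toNat + 1) n 2 PySem.Dict.empty).2.contains
            (pfOuter (n.toNat + 1) n 2 PySem.Dict.empty).1 = false := by
          rw [PySem.Dict.contains_eq_decide_mem_keys]
          simp only [PySem.Dict.keys, hitems, decide_eq_false_iff_not]
          intro hmem
          rw [List.map_map, List.mem_map] at hmem
          rcases hmem with ⟨p, hp, hpe⟩
          have := pfPure_keys_lt_rem n 2 h0 (by omega) hns (hfst ▸ h1) p hp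
          rw [hfst] at hpe
          simp only [Function.comp_apply] at hpe
          omega
        rw [PySem.Dict.items_insert_of_not_contains _ _ hcont,
          PySem.Dict.getD_of_not_contains _ _ hcont, hitems, hfst]
        norm_num
      · rw [if_neg h1, if_neg (hfst ▸ h1), hitems, List.append_nil]
    -- A's unsorted pair list equals B's output list
    have hA : (prime_factors n).items.foldl
        (fun acc pe =>
          if pe.1 ≤ mp then
            (PySem.List.pyRange 1 (pe.2 + 1) 1).foldl (fun a r => a ++ [(pe.1, r)]) acc
          else acc) [] =
        (bPure n 2 mp).2 ++
          (if 1 < (bPure n 2 mp).1 ∧ (bPure n 2 mp).1 ≤ mp then [((bPure n 2 mp).1, 1)] else []) := by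
      rw [admissible_foldl_eq, hAitems, List.flatMap_append, List.flatMap_map]
      have hpure : ((pfPure n 2).2.flatMap fun p =>
          if (p.1 : Int) ≤ mp then
            (PySem.List.pyRange 1 ((p.2 : Int) + 1) 1).map (fun r => (p.1, r)) else []) =
          (pfPure n 2).2.flatMap (fun p => if p.1 ≤ mp then pairsOf p.1 p.2 else []) := by
        exact List.flatMap_congr (fun p _ => fe_cast_eq mp p.1 p.2)
      have h12 : PySem.List.pyRange 1 ((1:Int) + 1) 1 = [1] := by decide
      have htail : ((if 1 < (pfPure n 2).1 then [((pfPure n 2).1, (1:Int))] else []).flatMap fun pe =>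
          if pe.1 ≤ mp then
            (PySem.List.pyRange 1 (pe.2 + 1) 1).map (fun r => (pe.1, r)) else []) =
          (if 1 < (pfPure n 2).1 ∧ (pfPure n 2).1 ≤ mp then [((pfPure n 2).1, 1)] else []) := by
        by_cases h1 : 1 < (pfPure n 2).1
        · rw [if_pos h1, List.flatMap_cons, List.flatMap_nil, List.append_nil]
          by_cases h2 : (pfPure n 2).1 ≤ mp
          · rw [if_pos h2, if_pos ⟨h1, h2⟩]
            dsimp only
            rw [h12]
            rfl
          · rw [if_neg h2, if_neg (fun hc => h2 hc.2)]
        · rw [if_neg h1, if_neg (fun hc => h1 hc.1), List.flatMap_nil]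
      rw [hpure, htail]
      exact main_eq n 2 mp h0 (by omega) hns
    have hBside : list_admissible_projectors_alt n mp =
        (bPure n 2 mp).2 ++
          (if 1 < (bPure n 2 mp).1 ∧ (bPure n 2 mp).1 ≤ mp then [((bPure n 2 mp).1, 1)] else []) := by
      rw [list_admissible_projectors_alt, if_neg hn]
      dsimp only
      rw [altOuter_eq (n.toNat + 1) n 2 mp [] h0 (by omega) (by omega)]
      dsimp only
      rw [List.nil_append]
      by_cases hc : 1 < (bPure n 2 mp).1 ∧ (bPure n 2 mp).1 ≤ mp
      · rw [if_pos hc, if_pos hc]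
      · rw [if_neg hc, if_neg hc, List.append_nil]
    have hAside : list_admissible_projectors n mp =
        (bPure n 2 mp).2 ++
          (if 1 < (bPure n 2 mp).1 ∧ (bPure n 2 mp).1 ≤ mp then [((bPure n 2 mp).1, 1)] else []) := by
      rw [list_admissible_projectors]
      rw [hA]
      exact sorted2_eq_self _ (bPure_full_pairwise n 2 mp h0 (by omega) hns)
    rw [hAside, hBside]
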